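-- pv_equiv track=rewrite | github.com/jm4ch4do/m4ch4do_myCWs | 5kyu/play_greed.py | play_greed
-- ===== SOURCE A (Python) =====
-- def play_greed(_trow):
--     """
--     (list_of_int) -> int
--     :param _trow: list with 5 ints in the range 1-6 (each int represents a dice roll)
--     :return: The amount of points earned by the trow
--
--     :description:
--     According to the rules of the Greed game
--     Three 1's -> 1000 points
--     Three 6's ->  600 points
--     Three 5's ->  500 points
--     Three 4's ->  400 points
--     Three 3's ->  300 points
--     Three 2's ->  200 points
--     One   1   ->  100 points
--     One   5   ->   50 points
--
--     Every dice can only be counted once for earning points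
--
--     :examples:
--     [5, 1, 3, 4, 1] -> 250  (50 + 1*100)
--     [1, 1, 1, 3, 1] -> 1100 (1000 + 100)
--     [2, 4, 4, 5, 4] -> 450  (400 + 50)
--
--     :internal_var:
--     rep -> dict with the number of repetitions of each number
--                 ex. for input [1, 1, 1, 3, 1] -> rep = {1: 4, 3: 1}
--                 because number 1 was repeated 4 times and number 3 one time
--
--     """
--     # initial values
--     total_points = 0  # output variable
--
--     pointx3 = {  # points earned when a number is repeated three times
--         1: 1000,
--         6: 600,
--         5: 500,
--         4: 400,
--         3: 300,
--         2: 200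
--     }
--
--     pointx1 = {  # points earned when a number appears at least one time
--         1: 100,
--         5: 50
--     }
--
--     # count number of repetitions
--     rep = {}  # counting dictionary
--     for value in _trow:
--         rep.setdefault(value, 0)
--         rep[value] += 1
--
--     # earn points
--     for key, value in rep.items():
--         if value == 1:
--             total_points += pointx1.get(key, 0)
--         elif value == 2:
--             total_points += pointx1.get(key, 0) * 2
--         elif value == 3:
--             total_points += pointx3[key]
--         elif value == 4:
--             total_points += pointx3[key] + pointx1.get(key, 0)
--         elif value == 5:
--             total_points += pointx3[key] + pointx1.get(key, 0) * 2
--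
--     return total_points
-- ===== SOURCE B (Python) =====
-- def play_greed(_trow):
--     # Sort the rolls and scan runs of equal faces: each run scores one
--     # triple bonus (if length >= 3) plus leftover singles.
--     POINTX3 = {1: 1000, 2: 200, 3: 300, 4: 400, 5: 500, 6: 600}
--     POINTX1 = {1: 100, 5: 50}
--     rolls = sorted(_trow)
--     n = len(rolls)
--     total = 0
--     i = 0
--     while i < n:
--         j = i
--         while j < n and rolls[j] == rolls[i]:
--             j += 1
--         face = rolls[i]
--         c = j - i
--         if c >= 3:
--             total += POINTX3[face]
--             c -= 3
--         total += c * POINTX1.get(face, 0)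
--         i = j
--     return total
-- ===== Notes on version B (the rewrite author's own statement) =====
-- stated objective: alternative
-- what changed: Replaces A's dict-counting pass plus five-way elif chain over dict items by sorting the rolls and scanning runs of equal faces, scoring each run as one triple bonus (if the run has >= 3 dice) plus leftover singles.
-- intended difference: On lists where some face 1-6 occurs six or more times, A's elif chain falls through and awards that face 0 points, while B awards the triple bonus plus leftover singles, the intended score under the rule that every die counts once (inputs with more than 5 dice are outside the documented 5-dice domain). — e.g. on play_greed([1, 1, 1, 1, 1, 1]): A returns 0, B returns 1300
-- outside the precondition, e.g. on play_greed([7, 7, 7, 7, 7, 7]): A returns 0, B raises KeyError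
import Mathlib
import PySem

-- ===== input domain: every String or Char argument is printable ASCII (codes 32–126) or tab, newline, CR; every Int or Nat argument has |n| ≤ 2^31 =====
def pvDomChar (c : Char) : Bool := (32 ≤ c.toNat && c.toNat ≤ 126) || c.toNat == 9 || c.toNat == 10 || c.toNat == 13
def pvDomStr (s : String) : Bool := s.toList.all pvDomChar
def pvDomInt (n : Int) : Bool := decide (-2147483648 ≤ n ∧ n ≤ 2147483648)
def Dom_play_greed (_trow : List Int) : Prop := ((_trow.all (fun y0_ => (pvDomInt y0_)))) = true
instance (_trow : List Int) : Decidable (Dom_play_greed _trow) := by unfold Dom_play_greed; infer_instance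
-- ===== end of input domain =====

-- B re-implements the Greed score by sorting the rolls and scanning runs of equal
-- faces (triple bonus + leftover singles per run) instead of the dict-counting
-- five-way elif chain of A; objective: alternative decomposition, same cost.

-- ===== PORT A =====
-- A's two literal point dicts (module-level helpers of the port)
def pvAX3 : PySem.Dict Int Int :=
  PySem.Dict.ofList [(1, 1000), (6, 600), (5, 500), (4, 400), (3, 300), (2, 200)]
def pvAX1 : PySem.Dict Int Int := PySem.Dict.ofList [(1, 100), (5, 50)]

def play_greed (_trow : List Int) : Int :=
  -- rep.setdefault(value, 0); rep[value] += 1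
  let rep := _trow.foldl (fun d v =>
    let d := d.setdefault v 0
    d.insert v (d.getD v 0 + 1)) (PySem.Dict.empty : PySem.Dict Int Int)
  -- for key, value in rep.items(): the elif chain.
  -- Python's pointx3[key] raises KeyError when key ∉ {1..6}; ported total as
  -- getD _ 0 — exact on Pre_play_greed, which excludes exactly those inputs.
  rep.items.foldl (fun tp kv =>
    if kv.2 = 1 then tp + pvAX1.getD kv.1 0
    else if kv.2 = 2 then tp + pvAX1.getD kv.1 0 * 2
    else if kv.2 = 3 then tp + pvAX3.getD kv.1 0
    else if kv.2 = 4 then tp + (pvAX3.getD kv.1 0 + pvAX1.getD kv.1 0)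
    else if kv.2 = 5 then tp + (pvAX3.getD kv.1 0 + pvAX1.getD kv.1 0 * 2)
    else tp) 0

-- ===== PORT B =====
-- B's two literal point dicts
def pvBX3 : PySem.Dict Int Int :=
  PySem.Dict.ofList [(1, 1000), (2, 200), (3, 300), (4, 400), (5, 500), (6, 600)]
def pvBX1 : PySem.Dict Int Int := PySem.Dict.ofList [(1, 100), (5, 50)]

-- body of B's outer-loop iteration for one run: triple bonus + leftover singles
-- (POINTX3[face] ported total as getD _ 0, exact on Pre_play_greed, as in A's port)
def pvRunScore (face : Int) (c : Nat) : Int :=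
  if 3 ≤ c then pvBX3.getD face 0 + ((c - 3 : Nat) : Int) * pvBX1.getD face 0
  else (c : Int) * pvBX1.getD face 0

-- B's while-loop: the inner j-loop is the takeWhile (run) / dropWhile (rest);
-- the fuel argument (one unit per outer iteration, start = length) only makes
-- the recursion structural and is never exhausted
def pvScan : Nat → List Int → Int
  | _, [] => 0
  | 0, _ :: _ => 0
  | fuel + 1, v :: rest =>
      pvRunScore v ((rest.takeWhile (· == v)).length + 1) +
      pvScan fuel (rest.dropWhile (· == v))

def play_greed_alt (_trow : List Int) : Int :=
  pvScan _trow.length (PySem.List.sorted _trow (fun x => x) false)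

-- ===== PRECONDITION & SPEC =====
-- Pre_ excludes lists in which some value outside 1..6 occurs three or more
-- times: there Python A raises KeyError when it occurs 3, 4 or 5 times, and B
-- raises KeyError whenever such a value occurs ≥ 3 times (so for ≥ 6
-- occurrences A still returns while B raises — see claim.json "cites").
def Pre_play_greed (_trow : List Int) : Prop :=
  ∀ v ∈ _trow, 3 ≤ _trow.count v → 1 ≤ v ∧ v ≤ 6
instance (_trow : List Int) : Decidable (Pre_play_greed _trow) := by
  unfold Pre_play_greed; infer_instance

def pvWitness_play_greed : List Int := [5, 1, 3, 4, 1]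

-- On lists where some face 1..6 occurs six or more times A returns no points at
-- all for that face (its elif chain stops at count 5), while B returns the
-- triple bonus plus leftover singles, the intended score by the game's rule
-- that every die counts once.
def D_play_greed (_trow : List Int) : Prop :=
  ∃ v ∈ _trow, 1 ≤ v ∧ v ≤ 6 ∧ 6 ≤ _trow.count v
instance (_trow : List Int) : Decidable (D_play_greed _trow) := by
  unfold D_play_greed; infer_instance

def Spec_play_greed (_trow : List Int) (out : Int) : Prop :=
  ¬ D_play_greed _trow → out = play_greed_alt _trow
instance (_trow : List Int) (out : Int) : Decidable (Spec_play_greed _trow out) := by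
  unfold Spec_play_greed; infer_instance

def pvDiffWitness_play_greed : List Int := [1, 1, 1, 1, 1, 1]
def pvDiffWitnessOut_play_greed : Int × Int := (0, 1300)

-- ===== CLAIM (what is proved, stated in full; the proofs are below) =====
def Claim_unchanged_play_greed : Prop := ∀ (_trow : List Int), Dom_play_greed _trow → Pre_play_greed _trow → Spec_play_greed _trow (play_greed _trow)
def Claim_changed_play_greed : Prop := Dom_play_greed (pvDiffWitness_play_greed) ∧ Pre_play_greed (pvDiffWitness_play_greed) ∧ D_play_greed (pvDiffWitness_play_greed) ∧ play_greed (pvDiffWitness_play_greed) = pvDiffWitnessOut_play_greed.1 ∧ play_greed_alt (pvDiffWitness_play_greed) = pvDiffWitnessOut_play_greed.2 ∧ pvDiffWitnessOut_play_greed.1 ≠ pvDiffWitnessOut_play_greed.2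
def Claim_exact_play_greed : Prop := ∀ (_trow : List Int), Dom_play_greed _trow → Pre_play_greed _trow → D_play_greed _trow → play_greed _trow ≠ play_greed_alt _trow

-- ===== LEMMAS AND PROOFS =====

-- A's elif chain as a function of one (key, count) pair
def pvChain (k c : Int) : Int :=
  if c = 1 then pvAX1.getD k 0
  else if c = 2 then pvAX1.getD k 0 * 2
  else if c = 3 then pvAX3.getD k 0
  else if c = 4 then pvAX3.getD k 0 + pvAX1.getD k 0
  else if c = 5 then pvAX3.getD k 0 + pvAX1.getD k 0 * 2
  else 0

-- A's counting loop body is Counter's modify step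
theorem pvStep_eq (d : PySem.Dict Int Int) (v : Int) :
    ((d.setdefault v 0).insert v ((d.setdefault v 0).getD v 0 + 1)) = d.modify v 0 (· + 1) := by
  unfold PySem.Dict.modify
  by_cases h : d.contains v = true
  · rw [PySem.Dict.setdefault_of_contains _ _ h]
  · rw [PySem.Dict.setdefault_of_not_contains _ _ (by simpa using h)]
    rw [PySem.Dict.getD_insert_self, PySem.Dict.insert_insert_self]
    have h2 : d.get? v = none := by
      rw [← Option.not_isSome_iff_eq_none, ← PySem.Dict.contains_eq_isSome_get?]; simp [h]
    have h3 : d.getD v 0 = 0 := by unfold PySem.Dict.getD; simp [h2]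
    simp [h3]

-- A as a sum over the distinct faces
theorem pvA_sum (trow : List Int) :
    play_greed trow = ∑ v ∈ trow.toFinset, pvChain v (trow.count v : Int) := by
  have hrep : trow.foldl (fun d v =>
      (d.setdefault v 0).insert v ((d.setdefault v 0).getD v 0 + 1)) PySem.Dict.empty
      = PySem.Dict.counter trow := by
    rw [PySem.Dict.counter_eq_foldl]
    congr 1
    funext d v
    exact pvStep_eq d v
  have hbody : (fun (tp : Int) (kv : Int × Int) =>
      if kv.2 = 1 then tp + pvAX1.getD kv.1 0
      else if kv.2 = 2 then tp + pvAX1.getD kv.1 0 * 2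
      else if kv.2 = 3 then tp + pvAX3.getD kv.1 0
      else if kv.2 = 4 then tp + (pvAX3.getD kv.1 0 + pvAX1.getD kv.1 0)
      else if kv.2 = 5 then tp + (pvAX3.getD kv.1 0 + pvAX1.getD kv.1 0 * 2)
      else tp) = fun tp kv => tp + pvChain kv.1 kv.2 := by
    funext tp kv
    simp only [pvChain]
    split_ifs <;> ring
  simp only [play_greed]
  rw [hrep, hbody, PySem.List.foldl_add, PySem.Dict.items_counter, List.map_map]
  have hnd := PySem.Set.nodup_ofList (xs := trow)
  rw [← List.sum_toFinset _ hnd]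
  have hfs : (PySem.Set.ofList trow).toFinset = trow.toFinset := by
    ext x
    simp [List.mem_toFinset, PySem.Set.mem_ofList]
  rw [hfs]
  simp [Function.comp]

-- B's scan of a sorted list as a sum over the distinct faces
theorem pvB_scan_sum (fuel : Nat) (xs : List Int) (hf : xs.length ≤ fuel) (hs : xs.Pairwise (· ≤ ·)) :
    pvScan fuel xs = ∑ v ∈ xs.toFinset, pvRunScore v (xs.count v) := by
  induction fuel generalizing xs with
  | zero =>
    have : xs = [] := List.eq_nil_of_length_eq_zero (Nat.le_zero.mp hf)
    subst this; simp [pvScan]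
  | succ fuel ih =>
    cases xs with
    | nil => simp [pvScan]
    | cons v rest =>
      have hsplit : rest.takeWhile (· == v) ++ rest.dropWhile (· == v) = rest :=
        List.takeWhile_append_dropWhile
      set run := rest.takeWhile (· == v) with hrundef
      set tail := rest.dropWhile (· == v) with htaildef
      have hrun : ∀ w ∈ run, w = v := fun w hw => by
        simpa using List.mem_takeWhile_imp hw
      have hvle : ∀ w ∈ rest, v ≤ w := (List.pairwise_cons.mp hs).1
      have htail_sub : ∀ w ∈ tail, w ∈ rest := fun w hw =>
        (List.dropWhile_suffix (· == v)).subset hw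
      have htail_sorted : tail.Pairwise (· ≤ ·) :=
        List.Pairwise.sublist (List.dropWhile_suffix (· == v)).sublist (List.Pairwise.of_cons hs)
      have hvnottail : v ∉ tail := by
        cases htl : tail with
        | nil => simp
        | cons h0 t' =>
          have hne : (h0 == v) = false := by
            have := List.head_dropWhile_not (· == v) (l := rest)
              (by rw [← htaildef, htl]; simp)
            simpa [← htaildef, htl] using this
          have hlt : v < h0 := by
            have h1 : v ≤ h0 := hvle h0 (htail_sub h0 (by simp [htl]))
            have h2 : h0 ≠ v := by simpa using hne
            omega
          have hh0le : ∀ w ∈ t', h0 ≤ w := by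
            have := htail_sorted
            rw [htl] at this
            exact (List.pairwise_cons.mp this).1
          intro hv
          rcases List.mem_cons.mp hv with rfl | hv
          · omega
          · have := hh0le v hv; omega
      have hruncount : run.count v = run.length :=
        List.count_eq_length.mpr (fun b hb => ((hrun b hb).symm))
      have htailcount : tail.count v = 0 := List.count_eq_zero.mpr hvnottail
      have hcv : (v :: rest).count v = run.length + 1 := by
        rw [List.count_cons_self, ← hsplit, List.count_append, hruncount, htailcount]
      have hcw : ∀ w, w ≠ v → (v :: rest).count w = tail.count w := by
        intro w hw
        have hrw : run.count w = 0 :=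
          List.count_eq_zero.mpr (fun hmem => hw (hrun w hmem))
        have h1 : (v :: rest).count w = rest.count w := by
          simp [Ne.symm hw]
        rw [h1, ← hsplit, List.count_append, hrw, Nat.zero_add]
      have hfs : (v :: rest).toFinset = insert v tail.toFinset := by
        ext x
        simp only [List.toFinset_cons, Finset.mem_insert, List.mem_toFinset, ← hsplit,
          List.mem_append]
        constructor
        · rintro (rfl | hx | hx)
          exacts [Or.inl rfl, Or.inl (hrun _ hx), Or.inr hx]
        · rintro (rfl | hx)
          exacts [Or.inl rfl, Or.inr (Or.inr hx)]
      have hlen : tail.length ≤ fuel := by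
        have h1 : tail.length ≤ rest.length := by
          rw [← hsplit, List.length_append]; omega
        have h2 : rest.length + 1 ≤ fuel + 1 := by simpa using hf
        omega
      have hstep : pvScan (fuel + 1) (v :: rest) =
          pvRunScore v (run.length + 1) + pvScan fuel tail := rfl
      rw [hstep, ih tail hlen htail_sorted, hfs,
        Finset.sum_insert (by simpa [List.mem_toFinset] using hvnottail), hcv]
      congr 1
      refine Finset.sum_congr rfl (fun w hw => ?_)
      rw [hcw w (fun h => hvnottail (h ▸ List.mem_toFinset.mp hw))]

theorem pvB_sum (trow : List Int) :
    play_greed_alt trow = ∑ v ∈ trow.toFinset, pvRunScore v (trow.count v) := by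
  have hperm : (PySem.List.sorted trow (fun x => x) false).Perm trow :=
    PySem.List.sorted_perm trow (fun x => x) false
  have hpw : (PySem.List.sorted trow (fun x => x) false).Pairwise (· ≤ ·) := by
    simpa using PySem.List.sorted_pairwise trow (fun x => x)
  rw [play_greed_alt, ← hperm.length_eq,
    pvB_scan_sum _ _ le_rfl hpw, List.toFinset_eq_of_perm _ _ hperm]
  exact Finset.sum_congr rfl (fun w _ => by rw [hperm.count w])

-- pointwise comparison of the two scoring rules
theorem pvPoint_eq (v : Int) (c : Nat) (hc : 1 ≤ c) (hc5 : c ≤ 5)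
    (hv : 3 ≤ c → 1 ≤ v ∧ v ≤ 6) :
    pvChain v (c : Int) = pvRunScore v c := by
  interval_cases c
  · simp [pvChain, pvRunScore, pvAX1, pvBX1]
  · simp [pvChain, pvRunScore, pvAX1, pvBX1]; ring
  · obtain ⟨h1, h2⟩ := hv (by omega); interval_cases v <;> decide
  · obtain ⟨h1, h2⟩ := hv (by omega); interval_cases v <;> decide
  · obtain ⟨h1, h2⟩ := hv (by omega); interval_cases v <;> decide

-- for counts ≥ 6 (the D_ region): A's chain yields 0, B's run score is positive
theorem pvPoint_big (v : Int) (c : Nat) (hv1 : 1 ≤ v) (hv6 : v ≤ 6) (hc : 6 ≤ c) :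
    pvChain v (c : Int) = 0 ∧ 0 < pvRunScore v c := by
  constructor
  · have h1 : (c : Int) ≠ 1 := by omega
    have h2 : (c : Int) ≠ 2 := by omega
    have h3 : (c : Int) ≠ 3 := by omega
    have h4 : (c : Int) ≠ 4 := by omega
    have h5 : (c : Int) ≠ 5 := by omega
    simp [pvChain, h1, h2, h3, h4, h5]
  · have hx : 200 ≤ pvBX3.getD v 0 ∧ 0 ≤ pvBX1.getD v 0 := by
      interval_cases v <;> exact ⟨by decide, by decide⟩
    have hge : (0 : Int) ≤ ((c - 3 : Nat) : Int) * pvBX1.getD v 0 :=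
      mul_nonneg (by positivity) hx.2
    have : pvRunScore v c = pvBX3.getD v 0 + ((c - 3 : Nat) : Int) * pvBX1.getD v 0 := by
      simp [pvRunScore, show 3 ≤ c by omega]
    omega

-- ===== VERDICT (by name: the statement is the Claim_ definition above) =====
theorem play_greed_spec : Claim_unchanged_play_greed := by
  intro trow _hdom hpre hnd
  rw [pvA_sum, pvB_sum]
  refine Finset.sum_congr rfl (fun v hv => ?_)
  have hmem : v ∈ trow := List.mem_toFinset.mp hv
  have hc1 : 1 ≤ trow.count v := List.count_pos_iff.mpr hmem
  have hc5 : trow.count v ≤ 5 := by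
    by_contra h
    exact hnd ⟨v, hmem, (hpre v hmem (by omega)).1, (hpre v hmem (by omega)).2, by omega⟩
  exact pvPoint_eq v _ hc1 hc5 (fun h3 => hpre v hmem h3)

theorem play_greed_changed : Claim_changed_play_greed := by
  unfold Claim_changed_play_greed; decide

theorem play_greed_tight : Claim_exact_play_greed := by
  intro trow _hdom hpre hd
  obtain ⟨v0, hmem0, h10, h60, hc0⟩ := hd
  rw [pvA_sum, pvB_sum]
  refine ne_of_lt (Finset.sum_lt_sum (fun v hv => ?_) ⟨v0, List.mem_toFinset.mpr hmem0, ?_⟩)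
  · have hmem : v ∈ trow := List.mem_toFinset.mp hv
    have hc1 : 1 ≤ trow.count v := List.count_pos_iff.mpr hmem
    by_cases h5 : trow.count v ≤ 5
    · exact le_of_eq (pvPoint_eq v _ hc1 h5 (fun h3 => hpre v hmem h3))
    · obtain ⟨hz, hp⟩ := pvPoint_big v (trow.count v) (hpre v hmem (by omega)).1
        (hpre v hmem (by omega)).2 (by omega)
      omega
  · obtain ⟨hz, hp⟩ := pvPoint_big v0 (trow.count v0) h10 h60 hc0
    omega
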